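-- pv_equiv track=rewrite | github.com/brucejeremy/Advent-of-code | 2021/3/decode.py | splitByBit
-- ===== SOURCE A (Python) =====
-- def splitByBit( nums: list, majority: bool, bitNum: int, default: int) -> list:
--     zeroBits = []
--     oneBits = []
--     for num in nums:
--         if num[bitNum] == '0': zeroBits.append(num)
--         else: oneBits.append(num)
--     if majority:
--         if default == 0:
--             return zeroBits if len(zeroBits) >= len(oneBits) else oneBits
--         else:
--             return zeroBits if len(zeroBits) > len(oneBits) else oneBits
--     else:
--         if default == 0:
--             return zeroBits if len(zeroBits) <= len(oneBits) else oneBits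
--         else:
--             return zeroBits if len(zeroBits) < len(oneBits) else oneBits
-- ===== SOURCE B (Python) =====
-- def splitByBit(nums: list, majority: bool, bitNum: int, default: int) -> list:
--     zeroCount = sum(1 for num in nums if num[bitNum] == '0')
--     oneCount = len(nums) - zeroCount
--     if majority:
--         keepZeros = zeroCount >= oneCount if default == 0 else zeroCount > oneCount
--     else:
--         keepZeros = zeroCount <= oneCount if default == 0 else zeroCount < oneCount
--     return [num for num in nums if (num[bitNum] == '0') == keepZeros]
-- ===== Notes on version B (the rewrite author's own statement) =====
-- stated objective: alternative
-- what changed: B counts the '0'-bit strings in one pass instead of materialising both partitions, decides a single keep-zeros boolean from the four majority/default cases, and produces the result by one selective filter pass.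
import Mathlib
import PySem

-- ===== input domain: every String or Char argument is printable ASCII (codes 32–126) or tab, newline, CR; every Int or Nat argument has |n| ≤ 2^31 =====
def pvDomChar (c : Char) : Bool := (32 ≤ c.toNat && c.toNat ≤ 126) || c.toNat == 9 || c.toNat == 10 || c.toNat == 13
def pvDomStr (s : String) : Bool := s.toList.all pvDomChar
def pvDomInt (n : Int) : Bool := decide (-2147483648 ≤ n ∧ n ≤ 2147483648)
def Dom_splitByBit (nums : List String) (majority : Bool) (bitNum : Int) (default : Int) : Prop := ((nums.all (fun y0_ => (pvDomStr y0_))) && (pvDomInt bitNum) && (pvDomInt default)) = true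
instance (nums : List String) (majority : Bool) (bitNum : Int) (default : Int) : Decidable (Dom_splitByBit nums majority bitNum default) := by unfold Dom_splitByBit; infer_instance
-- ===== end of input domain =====

-- B counts the '0'-bit strings in one pass, folds the four majority/default
-- tie-break cases into one keep-zeros boolean, and emits the result with a
-- single selective filter pass instead of building both partitions (objective: alternative).

-- ===== PORT A =====
def splitByBit (nums : List String) (majority : Bool) (bitNum : Int) (default : Int) : List String :=
  let p := nums.foldl (fun (acc : List String × List String) num =>
      if PySem.Str.pyGet? num bitNum = some '0' then (acc.1 ++ [num], acc.2)
      else (acc.1, acc.2 ++ [num])) ([], [])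
  let zeroBits := p.1
  let oneBits := p.2
  if majority then
    if default = 0 then (if oneBits.length ≤ zeroBits.length then zeroBits else oneBits)
    else (if oneBits.length < zeroBits.length then zeroBits else oneBits)
  else
    if default = 0 then (if zeroBits.length ≤ oneBits.length then zeroBits else oneBits)
    else (if zeroBits.length < oneBits.length then zeroBits else oneBits)

-- ===== PORT B =====
def splitByBit_alt (nums : List String) (majority : Bool) (bitNum : Int) (default : Int) : List String :=
  let zeroCount : Int := nums.foldl (fun c num => if PySem.Str.pyGet? num bitNum = some '0' then c + 1 else c) 0
  let oneCount : Int := (nums.length : Int) - zeroCount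
  let keepZeros : Bool :=
    if majority then (if default = 0 then decide (zeroCount ≥ oneCount) else decide (zeroCount > oneCount))
    else (if default = 0 then decide (zeroCount ≤ oneCount) else decide (zeroCount < oneCount))
  nums.filter (fun num => decide (PySem.Str.pyGet? num bitNum = some '0') == keepZeros)

-- ===== PRECONDITION & SPEC =====
-- Pre_ excludes exactly the inputs where Python A raises IndexError: some string
-- in nums has no character at index bitNum.
def Pre_splitByBit (nums : List String) (majority : Bool) (bitNum : Int) (default : Int) : Prop :=
  ∀ s ∈ nums, PySem.Raise.InRange s.toList.length bitNum
instance (nums : List String) (majority : Bool) (bitNum : Int) (default : Int) : Decidable (Pre_splitByBit nums majority bitNum default) := by unfold Pre_splitByBit; infer_instance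
def pvWitness_splitByBit : List String × Bool × Int × Int := (["01", "10", "11"], true, 0, 0)

def Spec_splitByBit (nums : List String) (majority : Bool) (bitNum : Int) (default : Int) (out : List String) : Prop := out = splitByBit_alt nums majority bitNum default
instance (nums : List String) (majority : Bool) (bitNum : Int) (default : Int) (out : List String) : Decidable (Spec_splitByBit nums majority bitNum default out) := by unfold Spec_splitByBit; infer_instance

-- ===== CLAIM (what is proved, stated in full; the proofs are below) =====
def Claim_equal_splitByBit : Prop := ∀ (nums : List String) (majority : Bool) (bitNum : Int) (default : Int), Dom_splitByBit nums majority bitNum default → Pre_splitByBit nums majority bitNum default → Spec_splitByBit nums majority bitNum default (splitByBit nums majority bitNum default)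

-- ===== LEMMAS AND PROOFS =====

-- A's partition loop produces (filter p, filter !p), shifted by the accumulator.
theorem pvPartition_foldl (q : String → Bool) (nums : List String) (z o : List String) :
    nums.foldl (fun (acc : List String × List String) num =>
      if q num = true then (acc.1 ++ [num], acc.2) else (acc.1, acc.2 ++ [num])) (z, o)
    = (z ++ nums.filter q, o ++ nums.filter (fun num => !q num)) := by
  induction nums generalizing z o with
  | nil => simp
  | cons x xs ih =>
    by_cases h : q x = true <;>
      simp [List.foldl_cons, h, ih, List.filter_cons]

-- B's counting loop counts the q-elements, shifted by the accumulator.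
theorem pvCount_foldl (q : String → Bool) (nums : List String) (c : Int) :
    nums.foldl (fun c num => if q num = true then c + 1 else c) c
    = c + ((nums.filter q).length : Int) := by
  induction nums generalizing c with
  | nil => simp
  | cons x xs ih =>
    by_cases h : q x = true <;>
      simp [List.foldl_cons, h, ih, List.filter_cons] <;> ring

theorem splitByBit_spec : Claim_equal_splitByBit := by
  intro nums majority bitNum default _ _
  unfold Spec_splitByBit splitByBit splitByBit_alt
  set q : String → Bool := fun num => decide (PySem.Str.pyGet? num bitNum = some '0') with hq
  have hfold : nums.foldl (fun (acc : List String × List String) num =>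
      if PySem.Str.pyGet? num bitNum = some '0' then (acc.1 ++ [num], acc.2)
      else (acc.1, acc.2 ++ [num])) ([], [])
      = (nums.filter q, nums.filter (fun num => !q num)) := by
    have := pvPartition_foldl q nums [] []
    simpa [hq] using this
  have hcount : nums.foldl (fun c num => if PySem.Str.pyGet? num bitNum = some '0' then c + 1 else c) (0 : Int)
      = ((nums.filter q).length : Int) := by
    have := pvCount_foldl q nums 0
    simpa [hq] using this
  have hlen : (nums.filter q).length + (nums.filter (fun num => !q num)).length = nums.length :=
    Eq.symm (List.length_eq_length_filter_add q)
  rw [hfold, hcount]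
  have hT : nums.filter (fun num => q num == true) = nums.filter q := by
    simp
  have hF : nums.filter (fun num => q num == false) = nums.filter (fun num => !q num) := by
    apply List.filter_congr
    intro x _
    cases q x <;> simp
  set zL := (nums.filter q).length with hzL
  set oL := (nums.filter (fun num => !q num)).length with hoL
  have key : ∀ K : Bool, nums.filter (fun num => q num == K)
      = if K = true then nums.filter q else nums.filter (fun num => !q num) := by
    intro K
    cases K
    · simpa using hF
    · simpa using hT
  cases majority <;> by_cases hd : default = 0 <;>
    simp only [hd, Bool.false_eq_true, if_true, if_false] <;>
    rw [key] <;>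
    exact if_congr (by simp only [decide_eq_true_eq, ge_iff_le, gt_iff_lt]; omega) rfl rfl
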